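-- pv_equiv track=rewrite | github.com/UT07/daily-job-hunt | lambdas/pipeline/tailor_resume.py | _check_brace_balance
-- ===== SOURCE A (Python) =====
-- def _check_brace_balance(tex: str) -> bool:
--     """Return True if {/} are balanced (ignoring \\{ and \\})."""
--     depth = 0
--     i = 0
--     while i < len(tex):
--         if tex[i] == "\\" and i + 1 < len(tex) and tex[i + 1] in "{}":
--             i += 2
--             continue
--         if tex[i] == "{":
--             depth += 1
--         elif tex[i] == "}":
--             depth -= 1
--             if depth < 0:
--                 return False
--         i += 1
--     return depth == 0
-- ===== SOURCE B (Python) =====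
-- import re
--
-- _ESCAPED_BRACE = re.compile(r'\\[{}]')
--
-- def _check_brace_balance(tex: str) -> bool:
--     depth = 0
--     for ch in _ESCAPED_BRACE.sub('', tex):
--         if ch == '{':
--             depth += 1
--         elif ch == '}':
--             depth -= 1
--             if depth < 0:
--                 return False
--     return depth == 0
-- ===== Notes on version B (the rewrite author's own statement) =====
-- stated objective: faster
-- what changed: Replaces the single interleaved index loop (manual 2-char skips for escaped braces) with a two-pass decomposition: a compiled-regex substitution deletes every escaped brace, then a plain for-loop over the filtered string maintains the depth counter.
import Mathlib
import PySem

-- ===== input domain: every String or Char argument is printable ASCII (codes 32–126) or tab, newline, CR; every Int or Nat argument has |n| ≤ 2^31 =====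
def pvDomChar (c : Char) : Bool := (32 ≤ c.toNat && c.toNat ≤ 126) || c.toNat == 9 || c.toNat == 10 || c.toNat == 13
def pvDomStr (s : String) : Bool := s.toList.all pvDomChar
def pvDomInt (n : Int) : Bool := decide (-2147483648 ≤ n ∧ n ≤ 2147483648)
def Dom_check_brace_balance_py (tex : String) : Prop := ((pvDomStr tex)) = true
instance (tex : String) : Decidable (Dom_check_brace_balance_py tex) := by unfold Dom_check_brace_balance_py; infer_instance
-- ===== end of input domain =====

-- B replaces A's single interleaved index loop with a regex filter pass (drop escaped braces) plus a clean depth scan; a timing run measured B faster (constant factor: C-level regex + per-char loop without indexing).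

-- ===== PORT A =====
-- A's while loop over index i, state = (remaining characters, depth); the 'i += 2; continue'
-- branch ("tex[i]=='\\' and i+1<len and tex[i+1] in '{}'") drops two characters at once
-- (rest.tail), hence the explicit termination measure.
def goA : List Char → Int → Bool
  | [], depth => depth == 0
  | c :: rest, depth =>
    if c = '\\' ∧ (rest.head? = some '{' ∨ rest.head? = some '}') then
      goA rest.tail depth
    else if c = '{' then goA rest (depth + 1)
    else if c = '}' then (if depth - 1 < 0 then false else goA rest (depth - 1))
    else goA rest depth
termination_by cs _ => cs.length
decreasing_by all_goals simp [List.length_tail]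

def check_brace_balance_py (tex : String) : Bool := goA tex.toList 0

-- ===== PORT B =====
-- re.sub(r'\\[{}]', '', tex): the regex engine scans left to right deleting each
-- non-overlapping backslash-then-brace match; exact port of that scan for this 2-char pattern.
def stripEsc : List Char → List Char
  | [] => []
  | c :: rest =>
    if c = '\\' ∧ (rest.head? = some '{' ∨ rest.head? = some '}') then stripEsc rest.tail
    else c :: stripEsc rest
termination_by cs => cs.length
decreasing_by all_goals simp [List.length_tail]

-- the for-loop over the filtered string with the depth accumulator
def scanB : List Char → Int → Bool
  | [], depth => depth == 0
  | c :: rest, depth =>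
    if c = '{' then scanB rest (depth + 1)
    else if c = '}' then (if depth - 1 < 0 then false else scanB rest (depth - 1))
    else scanB rest depth

def check_brace_balance_py_alt (tex : String) : Bool := scanB (stripEsc tex.toList) 0

-- ===== PRECONDITION & SPEC =====
def Spec_check_brace_balance_py (tex : String) (out : Bool) : Prop := out = check_brace_balance_py_alt tex
instance (tex : String) (out : Bool) : Decidable (Spec_check_brace_balance_py tex out) := by unfold Spec_check_brace_balance_py; infer_instance

-- ===== CLAIM (what is proved, stated in full; the proofs are below) =====
def Claim_equal_check_brace_balance_py : Prop := ∀ (tex : String), Dom_check_brace_balance_py tex → Spec_check_brace_balance_py tex (check_brace_balance_py tex)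

-- ===== LEMMAS AND PROOFS =====
lemma goA_eq_scanB_stripEsc : ∀ (cs : List Char) (d : Int), goA cs d = scanB (stripEsc cs) d := by
  intro cs d
  fun_induction goA cs d <;> simp_all [stripEsc, scanB]
  next c rest depth hesc hc1 hc2 ih =>
    have hcond : ¬(c = '\\' ∧ (rest.head? = some '{' ∨ rest.head? = some '}')) := by
      rintro ⟨rfl, hbr⟩
      rcases hbr with h | h <;> simp_all
    rw [if_neg hcond]
    simp [scanB, hc1, hc2]

-- ===== VERDICT (by name: the statement is the Claim_ definition above) =====
theorem check_brace_balance_py_spec : Claim_equal_check_brace_balance_py := by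
  intro tex _
  unfold Spec_check_brace_balance_py check_brace_balance_py check_brace_balance_py_alt
  exact goA_eq_scanB_stripEsc tex.toList 0
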